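-- pv_equiv track=rewrite | github.com/xjock/hello-agents | Co-creation-projects/JJason-DeepCastAgent/backend/src/services/text_processing.py | strip_tool_calls
-- ===== SOURCE A (Python) =====
-- def strip_tool_calls(text: str) -> str:
--     """移除文本中的工具调用标记。
--
--     支持嵌套方括号，例如:
--     [TOOL_CALL:note:{"tags":["deep_research","task_1"]}]
--     """
--     if not text:
--         return text
--
--     # 找到 [TOOL_CALL: 起始标记，然后手动匹配到对应的闭合 ]
--     result: list[str] = []
--     i = 0
--     marker = "[TOOL_CALL:"
--     while i < len(text):
--         pos = text.find(marker, i)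
--         if pos == -1:
--             result.append(text[i:])
--             break
--         result.append(text[i:pos])
--         # 从 marker 起始位置向后扫描，跟踪方括号深度
--         depth = 0
--         j = pos
--         while j < len(text):
--             if text[j] == "[":
--                 depth += 1
--             elif text[j] == "]":
--                 depth -= 1
--                 if depth == 0:
--                     break
--             j += 1
--         i = j + 1  # 跳过闭合的 ]
--     return "".join(result)
-- ===== SOURCE B (Python) =====
-- def strip_tool_calls(text: str) -> str:
--     """Single flat character scan: one pass with an inside/depth state machine."""
--     marker = "[TOOL_CALL:"
--     out = []
--     inside = False
--     depth = 0
--     for i, ch in enumerate(text):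
--         if not inside and text.startswith(marker, i):
--             inside = True
--             depth = 0
--         if inside:
--             if ch == "[":
--                 depth += 1
--             elif ch == "]":
--                 depth -= 1
--                 if depth == 0:
--                     inside = False
--         else:
--             out.append(ch)
--     return "".join(out)
-- ===== Notes on version B (the rewrite author's own statement) =====
-- stated objective: simpler
-- what changed: Replaces the nested find-marker loop plus inner depth-scanning while loop and slice appends with one flat per-character pass maintaining an inside flag and bracket depth.
import Mathlib
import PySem

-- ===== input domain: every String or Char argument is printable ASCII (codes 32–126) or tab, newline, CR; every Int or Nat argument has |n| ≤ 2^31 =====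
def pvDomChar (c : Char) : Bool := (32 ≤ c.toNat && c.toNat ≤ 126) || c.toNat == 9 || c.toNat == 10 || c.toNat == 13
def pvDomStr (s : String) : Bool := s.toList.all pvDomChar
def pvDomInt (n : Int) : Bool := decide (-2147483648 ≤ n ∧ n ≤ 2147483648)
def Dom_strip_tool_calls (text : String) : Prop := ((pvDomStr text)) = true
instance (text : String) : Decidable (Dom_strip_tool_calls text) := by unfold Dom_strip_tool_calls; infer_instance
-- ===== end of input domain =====

-- B replaces A's find-marker loop with an inner depth-scanning while loop by one flat
-- per-character pass with an inside/depth state machine (objective: simpler).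

-- ===== PORT A =====

-- marker = "[TOOL_CALL:"
def pvMarker : List Char := "[TOOL_CALL:".toList

-- A's inner while loop: scan from the marker position tracking bracket depth; returns the
-- offset j at which the loop stops (break on the depth-0 ']' , or the length if it runs out).
def pvScan : List Char → Int → Nat
  | [], _ => 0
  | c :: rest, depth =>
    if c = '[' then 1 + pvScan rest (depth + 1)
    else if c = ']' then
      (if depth - 1 = 0 then 0 else 1 + pvScan rest (depth - 1))
    else 1 + pvScan rest depth

-- A's outer while loop, with the position i represented by the remaining suffix of the text:
-- find the marker, emit the text before it, skip past the matching close bracket, repeat.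
def pvAGo (cs : List Char) : List Char :=
  let pos := PySem.Chars.find cs pvMarker
  if pos = -1 then cs
  else
    let fromPos := cs.drop pos.toNat
    cs.take pos.toNat ++ pvAGo (fromPos.drop (pvScan fromPos 0 + 1))
termination_by cs.length
decreasing_by
  have hne : cs ≠ [] := by
    intro h
    subst h
    have : pvMarker <:+: ([] : List Char) := (PySem.Chars.find_ne_neg_one_iff _ _).mp (by simpa using ‹¬ _›)
    simp [pvMarker] at this
  have : 0 < cs.length := List.length_pos_iff.mpr hne
  simp only [List.length_drop]
  omega

def strip_tool_calls (text : String) : String :=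
  if text.toList.isEmpty then text
  else String.ofList (pvAGo text.toList)

-- ===== PORT B =====

-- B's single loop over the characters: inside/depth state machine.
def pvBGo : List Char → Bool → Int → List Char
  | [], _, _ => []
  | c :: rest, inside0, depth0 =>
    let st := if !inside0 && List.isPrefixOf pvMarker (c :: rest) then (true, (0 : Int))
              else (inside0, depth0)
    if st.1 then
      if c = '[' then pvBGo rest true (st.2 + 1)
      else if c = ']' then
        (if st.2 - 1 = 0 then pvBGo rest false 0 else pvBGo rest true (st.2 - 1))
      else pvBGo rest true st.2
    else c :: pvBGo rest false st.2

def strip_tool_calls_alt (text : String) : String :=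
  String.ofList (pvBGo text.toList false 0)

-- ===== PRECONDITION & SPEC =====
def Spec_strip_tool_calls (text : String) (out : String) : Prop := out = strip_tool_calls_alt text
instance (text : String) (out : String) : Decidable (Spec_strip_tool_calls text out) := by unfold Spec_strip_tool_calls; infer_instance

-- ===== CLAIM (what is proved, stated in full; the proofs are below) =====
def Claim_equal_strip_tool_calls : Prop := ∀ (text : String), Dom_strip_tool_calls text → Spec_strip_tool_calls text (strip_tool_calls text)

-- ===== LEMMAS AND PROOFS =====

-- B in inside-mode consumes exactly the characters A's inner while loop scans (plus the
-- closing bracket) and resumes in outside-mode; the bookkeeping is depth-for-depth identical.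
theorem pvBGo_inside (cs : List Char) (d : Int) :
    pvBGo cs true d = pvBGo (cs.drop (pvScan cs d + 1)) false 0 := by
  induction cs generalizing d with
  | nil => simp [pvScan, pvBGo]
  | cons c rest ih =>
    by_cases h1 : c = '['
    · simp [pvBGo, pvScan, h1, ih (d + 1)]
      ring_nf
    · by_cases h2 : c = ']'
      · by_cases h3 : d - 1 = 0
        · simp [pvBGo, pvScan, h2, h3]
        · simp [pvBGo, pvScan, h2, h3, ih (d - 1)]
          ring_nf
      · simp [pvBGo, pvScan, h1, h2, ih d]
        ring_nf

-- If the marker never occurs, B in outside-mode copies the text unchanged.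
theorem pvBGo_no_marker (cs : List Char) (d : Int) (h : ¬ pvMarker <:+: cs) :
    pvBGo cs false d = cs := by
  induction cs generalizing d with
  | nil => simp [pvBGo]
  | cons c rest ih =>
    have hpre : ¬ List.isPrefixOf pvMarker (c :: rest) := by
      intro hp
      exact h (List.IsPrefix.isInfix (List.isPrefixOf_iff_prefix.mp hp))
    have hrest : ¬ pvMarker <:+: rest := fun hi =>
      h (hi.trans (List.IsSuffix.isInfix (List.suffix_cons c rest)))
    simp [pvBGo, hpre, ih d hrest]

-- Up to the first marker occurrence, B in outside-mode copies the text unchanged.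
theorem pvBGo_copy (pos : Nat) (cs : List Char)
    (h : ∀ i, i < pos → ¬ pvMarker <+: cs.drop i) (hle : pos ≤ cs.length) :
    pvBGo cs false 0 = cs.take pos ++ pvBGo (cs.drop pos) false 0 := by
  induction pos generalizing cs with
  | zero => simp
  | succ p ih =>
    cases cs with
    | nil => simp at hle
    | cons c rest =>
      have hpre : ¬ List.isPrefixOf pvMarker (c :: rest) := by
        intro hp
        exact h 0 (Nat.succ_pos p) (by simpa using List.isPrefixOf_iff_prefix.mp hp)
      have hrest : ∀ i, i < p → ¬ pvMarker <+: rest.drop i := by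
        intro i hi
        simpa using h (i + 1) (by omega)
      simp only [pvBGo, hpre, Bool.not_false, Bool.true_and]
      simp [ih rest hrest (by simpa using hle)]

-- If the marker is a prefix of cs then cs starts with '['.
theorem pvMarker_head (cs : List Char) (h : pvMarker <+: cs) :
    ∃ rest, cs = '[' :: rest := by
  obtain ⟨t, ht⟩ := h
  exact ⟨"TOOL_CALL:".toList ++ t, by rw [← ht]; rfl⟩

-- Main loop equivalence, by strong induction on the length of the remaining text:
-- A's outer loop and B's flat scan produce the same characters.
theorem pvAGo_eq_pvBGo_aux (n : Nat) : ∀ cs : List Char, cs.length ≤ n → pvAGo cs = pvBGo cs false 0 := by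
  induction n with
  | zero =>
    intro cs hlen
    have h0 : cs = [] := List.eq_nil_of_length_eq_zero (by omega)
    subst h0
    rw [pvAGo]
    simp [pvBGo, show PySem.Chars.find [] pvMarker = -1 from by decide]
  | succ n ih =>
    intro cs hlen
    rw [pvAGo]
    by_cases hfind : PySem.Chars.find cs pvMarker = -1
    · rw [pvBGo_no_marker cs 0 ((PySem.Chars.find_eq_neg_one_iff _ _).mp hfind)]
      simp [hfind]
    · simp only [hfind, if_false]
      have hpos : 0 ≤ PySem.Chars.find cs pvMarker := by
        have := PySem.Chars.neg_one_le_find cs pvMarker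
        omega
      obtain ⟨hprefix, hbefore⟩ := PySem.Chars.find_spec (s := cs) (sub := pvMarker) hpos
      have hlenf := PySem.Chars.find_le_length cs pvMarker
      set p := (PySem.Chars.find cs pvMarker).toNat with hp
      have hple : p ≤ cs.length := by omega
      rw [pvBGo_copy p cs (fun i hi => hbefore i hi) hple]
      congr 1
      obtain ⟨rest, hrest⟩ := pvMarker_head _ hprefix
      have hpre : List.isPrefixOf pvMarker (cs.drop p) = true :=
        List.isPrefixOf_iff_prefix.mpr hprefix
      rw [hrest] at hpre ⊢
      simp only [pvBGo, hpre, Bool.not_false, Bool.true_and, if_true]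
      have hscan : pvScan ('[' :: rest) 0 = 1 + pvScan rest 1 := by simp [pvScan]
      simp only [zero_add]
      rw [hscan, pvBGo_inside rest 1]
      have hdrop : ('[' :: rest).drop (1 + pvScan rest 1 + 1) = rest.drop (pvScan rest 1 + 1) := by
        have : 1 + pvScan rest 1 + 1 = (pvScan rest 1 + 1) + 1 := by omega
        rw [this, List.drop_succ_cons]
      rw [hdrop]
      have hrl : cs.length - p = rest.length + 1 := by
        have := congrArg List.length hrest
        simpa using this
      refine ih _ ?_
      simp only [List.length_drop]
      omega

theorem pvAGo_eq_pvBGo (cs : List Char) : pvAGo cs = pvBGo cs false 0 :=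
  pvAGo_eq_pvBGo_aux cs.length cs le_rfl

-- ===== VERDICT (by name: the statement is the Claim_ definition above) =====
theorem strip_tool_calls_spec : Claim_equal_strip_tool_calls := by
  intro text _
  unfold Spec_strip_tool_calls strip_tool_calls strip_tool_calls_alt
  by_cases h : text.toList.isEmpty
  · have h0 : text.toList = [] := by simpa [List.isEmpty_iff] using h
    rw [if_pos h]
    cases text with | _ d => simp_all [pvBGo]
  · rw [if_neg h, pvAGo_eq_pvBGo]
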